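-- pv_equiv track=rewrite | github.com/Geomanti/PolyInPoly | Functions.py | Points_X_Vectors
-- ===== SOURCE A (Python) =====
-- def Points_X_Vectors(polygon, intersectindexs, vectorlist):
-- 	polypoint = list()
-- 	TransformedPoly = list()
--
-- 	for index1 in range(len(polygon)):
-- 		cpoint = list()
-- 		cpoint = polygon[index1]
--
-- 		for index2 in range(len(intersectindexs)):
--
-- 			if index1 == intersectindexs[index2]:
-- 				polypoint = polygon[index1]
-- 				vector = vectorlist[index2]
-- 				cpoint = list()
-- 				x = polypoint[0] + vector[0]
-- 				y = polypoint[1] + vector[1]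
-- 				cpoint.append(x)
-- 				cpoint.append(y)
--
-- 		TransformedPoly.append(cpoint)
--
-- 	return TransformedPoly
-- ===== SOURCE B (Python) =====
-- def Points_X_Vectors(polygon, intersectindexs, vectorlist):
-- 	TransformedPoly = list(polygon)
-- 	for index2 in range(len(intersectindexs)):
-- 		idx = intersectindexs[index2]
-- 		if 0 <= idx < len(polygon):
-- 			vector = vectorlist[index2]
-- 			TransformedPoly[idx] = [polygon[idx][0] + vector[0], polygon[idx][1] + vector[1]]
-- 	return TransformedPoly
-- ===== Notes on version B (the rewrite author's own statement) =====
-- stated objective: faster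
-- what changed: B replaces A's per-point scan of the whole index list (gather, O(n*m)) by a single scatter pass over the index list that overwrites a shallow copy of the polygon in place (O(n+m)).
import Mathlib
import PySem

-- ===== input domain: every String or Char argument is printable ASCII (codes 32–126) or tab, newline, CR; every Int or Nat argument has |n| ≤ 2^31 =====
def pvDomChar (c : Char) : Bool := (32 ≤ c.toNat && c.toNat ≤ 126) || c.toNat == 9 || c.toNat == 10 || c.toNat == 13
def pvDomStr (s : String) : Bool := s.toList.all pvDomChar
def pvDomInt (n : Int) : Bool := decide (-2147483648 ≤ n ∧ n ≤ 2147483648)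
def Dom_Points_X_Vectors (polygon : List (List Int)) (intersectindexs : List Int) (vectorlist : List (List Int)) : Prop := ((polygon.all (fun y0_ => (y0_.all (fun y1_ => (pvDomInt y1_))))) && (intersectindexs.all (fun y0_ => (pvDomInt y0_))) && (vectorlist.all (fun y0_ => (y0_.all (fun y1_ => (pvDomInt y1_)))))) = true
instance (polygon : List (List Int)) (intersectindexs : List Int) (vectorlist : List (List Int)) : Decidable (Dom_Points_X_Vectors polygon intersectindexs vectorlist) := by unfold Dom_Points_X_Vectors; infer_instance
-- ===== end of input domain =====

-- B replaces A's per-point scan of all intersect indices (gather) by one scatter pass over the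
-- index list that overwrites a copy of the polygon; return values agree on Pre_ (no mutation issue:
-- neither program mutates its arguments).

-- ===== PORT A =====
-- A's gather: for each polygon index, scan all intersect indices, last match wins.
-- On Pre_ every indexing in A succeeds, so getD defaults are never the returned value.
def Points_X_Vectors (polygon : List (List Int)) (intersectindexs : List Int) (vectorlist : List (List Int)) : List (List Int) :=
  (List.range polygon.length).foldl (fun acc index1 =>
    let cpoint0 := polygon.getD index1 []
    let cpoint := (List.range intersectindexs.length).foldl (fun cp index2 =>
      if (index1 : Int) = intersectindexs.getD index2 0 then
        let polypoint := polygon.getD index1 []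
        let vector := vectorlist.getD index2 []
        [polypoint.getD 0 0 + vector.getD 0 0, polypoint.getD 1 0 + vector.getD 1 0]
      else cp) cpoint0
    acc ++ [cpoint]) []

-- ===== PORT B =====
-- B's scatter: copy the polygon, then overwrite at each in-range intersect index.
def Points_X_Vectors_alt (polygon : List (List Int)) (intersectindexs : List Int) (vectorlist : List (List Int)) : List (List Int) :=
  (List.range intersectindexs.length).foldl (fun tp index2 =>
    let idx := intersectindexs.getD index2 0
    if 0 ≤ idx ∧ idx < (polygon.length : Int) then
      let vector := vectorlist.getD index2 []
      let p := polygon.getD idx.toNat []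
      tp.set idx.toNat [p.getD 0 0 + vector.getD 0 0, p.getD 1 0 + vector.getD 1 0]
    else tp) polygon

-- ===== PRECONDITION & SPEC =====
-- Pre_ excludes exactly the inputs where Python A raises IndexError: a position j whose
-- intersect index hits the polygon but vectorlist has no entry j, or the vector or the
-- hit polygon point has fewer than 2 coordinates.
def Pre_Points_X_Vectors (polygon : List (List Int)) (intersectindexs : List Int) (vectorlist : List (List Int)) : Prop :=
  ((List.range intersectindexs.length).all (fun j =>
    !(decide (0 ≤ intersectindexs.getD j 0) && decide (intersectindexs.getD j 0 < (polygon.length : Int))) ||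
    (decide (j < vectorlist.length) && decide (2 ≤ (vectorlist.getD j []).length) &&
     decide (2 ≤ (polygon.getD (intersectindexs.getD j 0).toNat []).length)))) = true
instance (polygon : List (List Int)) (intersectindexs : List Int) (vectorlist : List (List Int)) : Decidable (Pre_Points_X_Vectors polygon intersectindexs vectorlist) := by unfold Pre_Points_X_Vectors; infer_instance

def pvWitness_Points_X_Vectors : List (List Int) × List Int × List (List Int) :=
  ([[0, 0], [3, 4], [5, 6]], [2, 0, -1, 7, 0], [[1, 1], [2, 2], [], [], [10, 10]])

def Spec_Points_X_Vectors (polygon : List (List Int)) (intersectindexs : List Int) (vectorlist : List (List Int)) (out : List (List Int)) : Prop := out = Points_X_Vectors_alt polygon intersectindexs vectorlist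
instance (polygon : List (List Int)) (intersectindexs : List Int) (vectorlist : List (List Int)) (out : List (List Int)) : Decidable (Spec_Points_X_Vectors polygon intersectindexs vectorlist out) := by unfold Spec_Points_X_Vectors; infer_instance

-- ===== CLAIM (what is proved, stated in full; the proofs are below) =====
def Claim_equal_Points_X_Vectors : Prop := ∀ (polygon : List (List Int)) (intersectindexs : List Int) (vectorlist : List (List Int)), Dom_Points_X_Vectors polygon intersectindexs vectorlist → Pre_Points_X_Vectors polygon intersectindexs vectorlist → Spec_Points_X_Vectors polygon intersectindexs vectorlist (Points_X_Vectors polygon intersectindexs vectorlist)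

-- ===== LEMMAS AND PROOFS =====

-- A's inner-loop step (for fixed polygon index i): exactly the body of A's inner fold.
def pvAstep (polygon : List (List Int)) (intersectindexs : List Int) (vectorlist : List (List Int)) (i : Nat) (cp : List Int) (j : Nat) : List Int :=
  if (i : Int) = intersectindexs.getD j 0 then
    [(polygon.getD i []).getD 0 0 + (vectorlist.getD j []).getD 0 0,
     (polygon.getD i []).getD 1 0 + (vectorlist.getD j []).getD 1 0]
  else cp

-- B's step: the body of B's fold, lets inlined.
def pvBstep (polygon : List (List Int)) (intersectindexs : List Int) (vectorlist : List (List Int)) (tp : List (List Int)) (j : Nat) : List (List Int) :=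
  if 0 ≤ intersectindexs.getD j 0 ∧ intersectindexs.getD j 0 < (polygon.length : Int) then
    tp.set (intersectindexs.getD j 0).toNat
      [(polygon.getD (intersectindexs.getD j 0).toNat []).getD 0 0 + (vectorlist.getD j []).getD 0 0,
       (polygon.getD (intersectindexs.getD j 0).toNat []).getD 1 0 + (vectorlist.getD j []).getD 1 0]
  else tp

lemma pvFoldl_append_map {α β : Type} (f : β → α) : ∀ (l : List β) (acc : List α),
    l.foldl (fun a b => a ++ [f b]) acc = acc ++ l.map f := by
  intro l
  induction l with
  | nil => simp
  | cons b l ih => intro acc; simp [List.foldl, ih]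

lemma pvBstep_length (polygon : List (List Int)) (intersectindexs : List Int) (vectorlist : List (List Int)) (tp : List (List Int)) (j : Nat) :
    (pvBstep polygon intersectindexs vectorlist tp j).length = tp.length := by
  unfold pvBstep; split <;> simp

lemma pvScatter_length (polygon : List (List Int)) (intersectindexs : List Int) (vectorlist : List (List Int)) :
    ∀ (js : List Nat) (tp : List (List Int)),
      (js.foldl (pvBstep polygon intersectindexs vectorlist) tp).length = tp.length := by
  intro js
  induction js with
  | nil => intro tp; rfl
  | cons j js ih => intro tp; simp [List.foldl, ih, pvBstep_length]

lemma pvBstep_getD (polygon : List (List Int)) (intersectindexs : List Int) (vectorlist : List (List Int)) (tp : List (List Int)) (j i : Nat)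
    (hlen : tp.length = polygon.length) (hi : i < polygon.length) :
    (pvBstep polygon intersectindexs vectorlist tp j).getD i [] =
      pvAstep polygon intersectindexs vectorlist i (tp.getD i []) j := by
  simp only [pvBstep, pvAstep, List.getD_eq_getElem?_getD]
  by_cases hg : 0 ≤ intersectindexs[j]?.getD 0 ∧ intersectindexs[j]?.getD 0 < (polygon.length : Int)
  · rw [if_pos hg]
    by_cases he : (i : Int) = intersectindexs[j]?.getD 0
    · have ht : (intersectindexs[j]?.getD 0).toNat = i := by omega
      rw [if_pos he, ht, List.getElem?_set_self (by omega : i < tp.length)]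
      rfl
    · have ht : (intersectindexs[j]?.getD 0).toNat ≠ i := by omega
      rw [if_neg he, List.getElem?_set_ne ht]
  · rw [if_neg hg, if_neg (by omega : ¬ ((i : Int) = intersectindexs[j]?.getD 0))]

lemma pvScatter_getD (polygon : List (List Int)) (intersectindexs : List Int) (vectorlist : List (List Int)) :
    ∀ (js : List Nat) (tp : List (List Int)), tp.length = polygon.length → ∀ i < polygon.length,
      (js.foldl (pvBstep polygon intersectindexs vectorlist) tp).getD i [] =
        js.foldl (pvAstep polygon intersectindexs vectorlist i) (tp.getD i []) := by
  intro js
  induction js with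
  | nil => intro tp _ i _; rfl
  | cons j js ih =>
    intro tp hlen i hi
    simp only [List.foldl]
    rw [ih _ (by rw [pvBstep_length]; exact hlen) i hi,
        pvBstep_getD polygon intersectindexs vectorlist tp j i hlen hi]

lemma pvA_as_map (polygon : List (List Int)) (intersectindexs : List Int) (vectorlist : List (List Int)) :
    Points_X_Vectors polygon intersectindexs vectorlist =
      (List.range polygon.length).map (fun i =>
        (List.range intersectindexs.length).foldl
          (pvAstep polygon intersectindexs vectorlist i) (polygon.getD i [])) := by
  unfold Points_X_Vectors
  rw [pvFoldl_append_map]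
  rfl

lemma pvB_as_foldl (polygon : List (List Int)) (intersectindexs : List Int) (vectorlist : List (List Int)) :
    Points_X_Vectors_alt polygon intersectindexs vectorlist =
      (List.range intersectindexs.length).foldl
        (pvBstep polygon intersectindexs vectorlist) polygon := rfl

lemma pvAB_eq (polygon : List (List Int)) (intersectindexs : List Int) (vectorlist : List (List Int)) :
    Points_X_Vectors polygon intersectindexs vectorlist =
      Points_X_Vectors_alt polygon intersectindexs vectorlist := by
  rw [pvA_as_map, pvB_as_foldl]
  apply List.ext_getElem
  · simp [pvScatter_length]
  · intro i h1 h2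
    have hi : i < polygon.length := by simpa using h1
    have hpt := pvScatter_getD polygon intersectindexs vectorlist
      (List.range intersectindexs.length) polygon rfl i hi
    rw [List.getD_eq_getElem _ _ h2, List.getD_eq_getElem _ _ hi] at hpt
    simp only [List.getElem_map, List.getElem_range]
    rw [List.getD_eq_getElem _ _ hi, hpt]

-- ===== VERDICT (by name: the statement is the Claim_ definition above) =====
theorem Points_X_Vectors_spec : Claim_equal_Points_X_Vectors := by
  intro polygon intersectindexs vectorlist _ _
  unfold Spec_Points_X_Vectors
  exact pvAB_eq polygon intersectindexs vectorlist
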